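-- pv_equiv track=rewrite | github.com/mendy5692/Python | Homework/mahat_23_01_2024.py | what
-- ===== SOURCE A (Python) =====
-- def what(a):
--     length = len(a)
--     for i in range(2, length - 1, 2):
--         if a[i] < a[i - 2]:
--             return False
--         i += 1
--         if a[i] > a[i - 2]:
--             return False
--     return True
-- ===== SOURCE B (Python) =====
-- def what(a):
--     # Two derived subsequences instead of an interleaved index loop:
--     # even-indexed entries (the last one is dropped when it has no follower
--     # inside the loop bound, hence the len(a)-1 stop) must be non-decreasing,
--     # odd-indexed entries must be non-increasing.
--     evens = a[0:len(a) - 1:2]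
--     odds = a[1::2]
--     return all(x <= y for x, y in zip(evens, evens[1:])) and \
--            all(y <= x for x, y in zip(odds, odds[1:]))
-- ===== Notes on version B (the rewrite author's own statement) =====
-- stated objective: simpler
-- what changed: Replaces A's interleaved index loop with two early returns by two derived slices (even-indexed entries up to len(a)-1, odd-indexed entries) checked for non-decreasing resp. non-increasing order with all() over adjacent zip pairs.
import Mathlib
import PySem

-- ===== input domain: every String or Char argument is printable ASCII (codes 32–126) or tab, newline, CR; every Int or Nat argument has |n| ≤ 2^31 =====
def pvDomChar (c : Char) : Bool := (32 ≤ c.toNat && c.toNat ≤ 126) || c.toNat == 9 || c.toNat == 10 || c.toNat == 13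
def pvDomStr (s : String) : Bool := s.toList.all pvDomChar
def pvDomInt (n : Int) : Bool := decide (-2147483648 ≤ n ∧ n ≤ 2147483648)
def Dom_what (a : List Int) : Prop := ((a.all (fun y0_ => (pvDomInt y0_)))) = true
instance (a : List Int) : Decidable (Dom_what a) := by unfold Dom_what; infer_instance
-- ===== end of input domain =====

-- B replaces A's interleaved index loop (two comparisons per step, early return)
-- by two derived slices — even-indexed entries up to len-1 and odd-indexed entries —
-- each checked for monotonicity over adjacent zip pairs; objective: simpler.

-- ===== PORT A =====
-- body of 'for i in range(2, length - 1, 2)'; the indices the loop generates are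
-- always in range (0 ≤ i - 2, i + 1 < length), so pyGetD's default is never read
def whatGo (a : List Int) : List Int → Bool
  | [] => true
  | i :: rest =>
    if PySem.List.pyGetD a i 0 < PySem.List.pyGetD a (i - 2) 0 then false
    else
      -- i += 1, then compare a[i] with a[i-2]
      if PySem.List.pyGetD a (i + 1) 0 > PySem.List.pyGetD a (i + 1 - 2) 0 then false
      else whatGo a rest

def what (a : List Int) : Bool :=
  whatGo a (PySem.List.pyRange 2 ((a.length : Int) - 1) 2)

-- ===== PORT B =====
-- evens = a[0:len(a)-1:2]; the step 2 is never 0, so slice? never returns none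
def whatEvens (a : List Int) : List Int :=
  (PySem.List.slice? a (some 0) (some ((a.length : Int) - 1)) 2).getD []

-- odds = a[1::2]
def whatOdds (a : List Int) : List Int :=
  (PySem.List.slice? a (some 1) none 2).getD []

-- all(x <= y for x, y in zip(evens, evens[1:])) and all(y <= x for x, y in zip(odds, odds[1:]))
def what_alt (a : List Int) : Bool :=
  let evens := whatEvens a
  let odds := whatOdds a
  ((evens.zip (PySem.List.slice evens (some 1) none)).all (fun p => decide (p.1 ≤ p.2))) &&
  ((odds.zip (PySem.List.slice odds (some 1) none)).all (fun p => decide (p.2 ≤ p.1)))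

-- ===== PRECONDITION & SPEC =====
def Spec_what (a : List Int) (out : Bool) : Prop := out = what_alt a
instance (a : List Int) (out : Bool) : Decidable (Spec_what a out) := by unfold Spec_what; infer_instance

-- ===== CLAIM (what is proved, stated in full; the proofs are below) =====
def Claim_equal_what : Prop := ∀ (a : List Int), Dom_what a → Spec_what a (what a)

-- ===== LEMMAS AND PROOFS =====

-- A's range(2, length-1, 2) in closed form
theorem pyRange_two_two (b : Int) :
    PySem.List.pyRange 2 b 2 = (List.range (((b-1)/2).toNat)).map (fun k : Nat => 2 + 2*(k:Int)) := by
  unfold PySem.List.pyRange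
  norm_num
  split_ifs <;> (congr 2 <;> omega)

theorem pyGetD_cons_cons_shift (u v d : Int) (a : List Int) (i : Int) (h : 0 ≤ i) :
    PySem.List.pyGetD (u::v::a) (i+2) d = PySem.List.pyGetD a i d := by
  unfold PySem.List.pyGetD
  rw [PySem.List.pyGet?_of_nonneg _ (by omega), PySem.List.pyGet?_of_nonneg _ h]
  have ht : (i+2).toNat = i.toNat + 2 := by omega
  rw [ht]
  simp

-- running A's loop on u :: v :: a with all indices shifted by 2 is running it on a
theorem whatGo_shift (u v : Int) (a : List Int) (l : List Nat) :
    whatGo (u::v::a) (l.map (fun k : Nat => 4 + 2*(k:Int))) =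
      whatGo a (l.map (fun k : Nat => 2 + 2*(k:Int))) := by
  induction l with
  | nil => rfl
  | cons k l ih =>
    simp only [List.map_cons]
    rw [whatGo, whatGo]
    rw [show (4 + 2*(k:Int)) = (2 + 2*(k:Int)) + 2 from by ring,
        pyGetD_cons_cons_shift _ _ _ _ _ (by omega)]
    rw [show (2 + 2*(k:Int)) + 2 - 2 = (2 + 2*(k:Int) - 2) + 2 from by ring,
        pyGetD_cons_cons_shift _ _ _ _ _ (by omega)]
    rw [show (2 + 2*(k:Int)) + 2 + 1 = (2 + 2*(k:Int) + 1) + 2 from by ring,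
        pyGetD_cons_cons_shift _ _ _ _ _ (by omega)]
    rw [show (2 + 2*(k:Int) + 1 + 2 - 2 : Int) = (2 + 2*(k:Int) + 1 - 2) + 2 from by ring,
        pyGetD_cons_cons_shift _ _ _ _ _ (by omega)]
    rw [ih]

-- A consumes the list two elements at a time
theorem what_rec (x y z w : Int) (t : List Int) :
    what (x :: y :: z :: w :: t) =
      ((decide (x ≤ z) && decide (w ≤ y)) && what (z :: w :: t)) := by
  unfold what
  rw [pyRange_two_two, pyRange_two_two]
  have h1 : ((((x::y::z::w::t).length : Int) - 1 - 1)/2).toNat = t.length/2 + 1 := by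
    simp; omega
  have h2 : ((((z::w::t).length : Int) - 1 - 1)/2).toNat = t.length/2 := by
    simp; omega
  rw [h1, h2, List.range_succ_eq_map, List.map_cons, List.map_map]
  have hc : ((fun k : Nat => 2 + 2*(k:Int)) ∘ Nat.succ) = (fun k : Nat => 4 + 2*(k:Int)) := by
    funext k; simp [Function.comp]; ring
  rw [hc]
  norm_num
  have g2 : PySem.List.pyGetD (x::y::z::w::t) 2 0 = z := by
    rw [PySem.List.pyGetD, PySem.List.pyGet?_of_nonneg _ (by omega)]; rfl
  have g0 : PySem.List.pyGetD (x::y::z::w::t) (2-2) 0 = x := by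
    rw [PySem.List.pyGetD, PySem.List.pyGet?_of_nonneg _ (by omega)]; rfl
  have g3 : PySem.List.pyGetD (x::y::z::w::t) (2+1) 0 = w := by
    rw [PySem.List.pyGetD, PySem.List.pyGet?_of_nonneg _ (by omega)]; rfl
  have g1 : PySem.List.pyGetD (x::y::z::w::t) (2+1-2) 0 = y := by
    rw [PySem.List.pyGetD, PySem.List.pyGet?_of_nonneg _ (by omega)]; rfl
  rw [whatGo, g2, g0, g3, g1, whatGo_shift x y (z::w::t)]
  by_cases hzx : z < x <;> by_cases hwy : w > y <;> simp [hzx, hwy]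
  all_goals omega

-- B's slices in closed form: the even- and odd-indexed elements
theorem whatEvens_eq (a : List Int) :
    whatEvens a = List.filterMap (fun k : Nat => a[2*k]?) (List.range (a.length/2)) := by
  unfold whatEvens
  simp only [PySem.List.slice?, PySem.List.sliceIndices]
  norm_num
  rcases a with _ | ⟨x, a⟩
  · rfl
  · split_ifs <;> first | exact ‹False›.elim | (congr 2 <;> omega)

theorem whatOdds_eq (a : List Int) :
    whatOdds a = List.filterMap (fun k : Nat => a[2*k+1]?) (List.range (a.length/2)) := by
  unfold whatOdds
  simp only [PySem.List.slice?, PySem.List.sliceIndices]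
  norm_num
  rcases a with _ | ⟨x, a⟩
  · rfl
  · have hmin : min (1:Int) (↑(x::a).length) = 1 := by simp
    rw [hmin]
    split_ifs <;> first
      | exact ‹False›.elim
      | (congr 1
         · funext k; congr 1; omega
         · congr 1; omega)

theorem whatEvens_cons_cons (x y : Int) (t : List Int) :
    whatEvens (x :: y :: t) = x :: whatEvens t := by
  rw [whatEvens_eq, whatEvens_eq]
  have h : (x::y::t).length/2 = t.length/2 + 1 := by simp; omega
  rw [h, List.range_succ_eq_map, List.filterMap_cons, List.filterMap_map]
  norm_num [Function.comp]
  apply List.filterMap_congr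
  intro k _
  rw [show 2*(k+1) = 2*k+1+1 from by ring]
  simp

theorem whatOdds_cons_cons (x y : Int) (t : List Int) :
    whatOdds (x :: y :: t) = y :: whatOdds t := by
  rw [whatOdds_eq, whatOdds_eq]
  have h : (x::y::t).length/2 = t.length/2 + 1 := by simp; omega
  rw [h, List.range_succ_eq_map, List.filterMap_cons, List.filterMap_map]
  norm_num [Function.comp]
  apply List.filterMap_congr
  intro k _
  rw [show 2*(k+1) = 2*k+1+1 from by ring]
  simp

-- B consumes the list two elements at a time, with the same head comparisons
theorem what_alt_rec (x y z w : Int) (t : List Int) :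
    what_alt (x :: y :: z :: w :: t) =
      ((decide (x ≤ z) && decide (w ≤ y)) && what_alt (z :: w :: t)) := by
  unfold what_alt
  rw [whatEvens_cons_cons, whatEvens_cons_cons, whatOdds_cons_cons, whatOdds_cons_cons]
  simp only [PySem.List.slice_from_one, List.tail_cons, List.zip_cons_cons, List.all_cons]
  cases hd : decide (x ≤ z) <;> cases he : decide (w ≤ y) <;> simp_all

theorem what_eq_alt : (a : List Int) → what a = what_alt a
  | [] => by
    simp [what, what_alt, whatEvens_eq, whatOdds_eq, pyRange_two_two, whatGo,
      PySem.List.slice_from_one]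
  | [_] => by
    simp [what, what_alt, whatEvens_eq, whatOdds_eq, pyRange_two_two, whatGo,
      PySem.List.slice_from_one]
  | [_, _] => by
    simp [what, what_alt, whatEvens_eq, whatOdds_eq, pyRange_two_two, whatGo, List.range_succ,
      PySem.List.slice_from_one]
  | [_, _, _] => by
    simp [what, what_alt, whatEvens_eq, whatOdds_eq, pyRange_two_two, whatGo, List.range_succ,
      PySem.List.slice_from_one]
  | x :: y :: z :: w :: t => by
    rw [what_rec, what_alt_rec, what_eq_alt (z :: w :: t)]

-- ===== VERDICT (by name: the statement is the Claim_ definition above) =====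
theorem what_spec : Claim_equal_what := by
  intro a _
  unfold Spec_what
  exact what_eq_alt a
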